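-- pv_equiv track=rewrite | github.com/amandahamynen/maze_solver | src/dead_end_filler.py | luo_ruudukko
-- ===== SOURCE A (Python) =====
-- def luo_ruudukko(n):
--
--     """ Luo dictionary-tyyppisen ruudukon, jonka avulla seurataan labyrintissa
--     kuljettuja reittejä.
--
--     Args:
--         n: Labyrintin leveys/korkeus.
--     Returns:
--         ruudukko, tyypiltään dictionary. Ruudukon arvot ilmaisevat, onko kyseiseen ruutuun
--         mahdollista kulkea. Ulkoseinät saavat arvon 3.
--     """
--
--     rivit = [i for i in range(0,n+2)] * (n+2)
--     sarakkeet = []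
--     x = 0
--     while x <= n+1:
--         for i in range(0,n+2):
--             sarakkeet.append(x)
--         x += 1
--     arvot = [0] * (n+2) * (n+2)
--     ruudukko = {(x,y): val for x, y, val in zip(rivit,sarakkeet,arvot)}
--     for i in ruudukko:
--         if i[0] == 0 or i [1]==0 or i[0] == n+1 or i[1] == n+1:
--             ruudukko[i] = 3
--     return ruudukko
-- ===== SOURCE B (Python) =====
-- def luo_ruudukko(n):
--     return {(i, x): (3 if i == 0 or x == 0 or i == n + 1 or x == n + 1 else 0)
--             for x in range(n + 2) for i in range(n + 2)}
-- ===== Notes on version B (the rewrite author's own statement) =====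
-- stated objective: simpler
-- what changed: B builds the grid in a single nested comprehension computing each cell's border value inline, replacing A's three parallel lists, zip, dict comprehension and second mutation pass over the dict.
import Mathlib
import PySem

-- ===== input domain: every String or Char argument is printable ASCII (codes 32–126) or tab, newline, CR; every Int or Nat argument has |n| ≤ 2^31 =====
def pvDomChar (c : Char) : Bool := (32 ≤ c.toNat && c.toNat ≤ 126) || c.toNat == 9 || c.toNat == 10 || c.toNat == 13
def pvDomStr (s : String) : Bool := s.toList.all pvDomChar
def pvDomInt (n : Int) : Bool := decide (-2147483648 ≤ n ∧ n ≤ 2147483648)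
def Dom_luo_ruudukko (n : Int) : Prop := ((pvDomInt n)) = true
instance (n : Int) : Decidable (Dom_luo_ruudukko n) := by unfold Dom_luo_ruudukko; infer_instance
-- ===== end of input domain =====

-- B builds the (n+2)² grid in ONE nested comprehension with the border value computed
-- inline, replacing A's three parallel lists, zip, dict comprehension and second
-- mutation pass (objective: simpler). The Python dict {(x,y): v} is returned here as
-- the flattened triple list (x, y, v) in insertion order.

-- ===== PORT A =====
-- the while-loop 'x = 0; while x <= n+1: for i in range(0, n+2): sarakkeet.append(x); x += 1'
def luoSarakkeet (n x : Int) : List Int :=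
  if x ≤ n + 1 then
    ((PySem.List.pyRange 0 (n + 2) 1).map (fun _ => x)) ++ luoSarakkeet n (x + 1)
  else []
termination_by (n + 2 - x).toNat
decreasing_by omega

def luo_ruudukko (n : Int) : List (Int × Int × Int) :=
  let rivit := PySem.List.pyRepeat (PySem.List.pyRange 0 (n + 2) 1) (n + 2)
  let sarakkeet := luoSarakkeet n 0
  let arvot := PySem.List.pyRepeat (PySem.List.pyRepeat [(0 : Int)] (n + 2)) (n + 2)
  let ruudukko : PySem.Dict (Int × Int) Int :=
    (rivit.zip (sarakkeet.zip arvot)).foldl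
      (fun d t => d.insert (t.1, t.2.1) t.2.2) PySem.Dict.empty
  let ruudukko2 :=
    ruudukko.keys.foldl
      (fun d i => if i.1 = 0 ∨ i.2 = 0 ∨ i.1 = n + 1 ∨ i.2 = n + 1 then d.insert i 3 else d)
      ruudukko
  ruudukko2.items.map (fun p => (p.1.1, p.1.2, p.2))

-- ===== PORT B =====
def luo_ruudukko_alt (n : Int) : List (Int × Int × Int) :=
  (PySem.List.pyRange 0 (n + 2) 1).flatMap (fun x =>
    (PySem.List.pyRange 0 (n + 2) 1).map (fun i =>
      (i, x, if i = 0 ∨ x = 0 ∨ i = n + 1 ∨ x = n + 1 then (3 : Int) else 0)))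

-- ===== PRECONDITION & SPEC =====
def Spec_luo_ruudukko (n : Int) (out : List (Int × Int × Int)) : Prop := out = luo_ruudukko_alt n
instance (n : Int) (out : List (Int × Int × Int)) : Decidable (Spec_luo_ruudukko n out) := by unfold Spec_luo_ruudukko; infer_instance

-- ===== CLAIM (what is proved, stated in full; the proofs are below) =====
def Claim_equal_luo_ruudukko : Prop := ∀ (n : Int), Dom_luo_ruudukko n → Spec_luo_ruudukko n (luo_ruudukko n)

-- ===== LEMMAS AND PROOFS =====

-- the while-loop equals a flatMap over the remaining counter values
theorem luoSarakkeet_eq (n : Int) : ∀ (fuel : Nat) (x : Int), (n + 2 - x).toNat = fuel →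
    luoSarakkeet n x
      = (PySem.List.pyRange x (n + 2) 1).flatMap
          (fun c => (PySem.List.pyRange 0 (n + 2) 1).map (fun _ => c)) := by
  intro fuel
  induction fuel with
  | zero =>
    intro x hx
    rw [luoSarakkeet]
    rw [if_neg (show ¬ x ≤ n + 1 by omega),
      PySem.List.pyRange_one_eq_nil (show n + 2 ≤ x by omega)]
    rfl
  | succ m ih =>
    intro x hx
    rw [luoSarakkeet]
    by_cases h : x ≤ n + 1
    · rw [if_pos h, PySem.List.pyRange_one_cons (show x < n + 2 by omega), List.flatMap_cons,
        ih (x + 1) (by omega)]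
    · rw [if_neg h, PySem.List.pyRange_one_eq_nil (show n + 2 ≤ x by omega)]
      rfl

-- zipping one block of the three parallel lists
theorem zip_block (R : List Int) (c : Int) :
    R.zip ((List.replicate R.length c).zip (List.replicate R.length (0 : Int)))
      = R.map (fun y => (y, (c, (0 : Int)))) := by
  induction R with
  | nil => rfl
  | cons y R ih =>
    simp only [List.length_cons, List.replicate_succ, List.zip_cons_cons, List.map_cons]
    exact congrArg (List.cons (y, (c, (0 : Int)))) (by simpa using ih)

-- zipping all the blocks
theorem zip_flat (R : List Int) : ∀ (xs : List Int),
    ((List.replicate xs.length R).flatten.zip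
      ((xs.flatMap (fun c => R.map (fun _ => c))).zip
        (List.replicate (xs.length * R.length) (0 : Int))))
      = xs.flatMap (fun c => R.map (fun y => (y, (c, (0 : Int))))) := by
  intro xs
  induction xs with
  | nil => rfl
  | cons c xs ih =>
    simp only [List.length_cons, List.replicate_succ, List.flatten_cons, List.flatMap_cons]
    rw [Nat.succ_mul, Nat.add_comm, List.replicate_add,
      List.zip_append (by simp), List.zip_append (by simp), List.map_const', zip_block, ih]

-- the key list of the grid is duplicate-free
theorem keys_nodup (m : Int) :
    ((PySem.List.pyRange 0 m 1).flatMap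
        (fun c => (PySem.List.pyRange 0 m 1).map (fun y => ((y, c) : Int × Int)))).Nodup := by
  have h : (PySem.List.pyRange 0 m 1).flatMap
        (fun c => (PySem.List.pyRange 0 m 1).map (fun y => ((y, c) : Int × Int)))
      = (((PySem.List.pyRange 0 m 1).product (PySem.List.pyRange 0 m 1)).map
          (fun p => (p.2, p.1))) := by
    simp [List.product, List.map_flatMap, Function.comp_def]
  rw [h]
  refine List.Nodup.map ?_ (List.Nodup.product ?_ ?_)
  · intro a b hab
    cases a; cases b
    simpa [Prod.ext_iff, and_comm] using hab
  · exact PySem.List.nodup_pyRange_one 0 m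
  · exact PySem.List.nodup_pyRange_one 0 m

-- the mutation pass over a snapshot of the keys rewrites matching values in place
theorem mut_items (P : Int × Int → Prop) [DecidablePred P] :
    ∀ (ks : List (Int × Int)) (d : PySem.Dict (Int × Int) Int),
      d.keys.Nodup → (∀ k ∈ ks, d.contains k = true) →
      (ks.foldl (fun d i => if P i then d.insert i 3 else d) d).items
        = d.items.map (fun p => if P p.1 ∧ p.1 ∈ ks then (p.1, (3 : Int)) else p) := by
  intro ks
  induction ks with
  | nil => intro d _ _; simp
  | cons k ks ih =>
    intro d hnd hc
    simp only [List.foldl_cons]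
    by_cases hP : P k
    · rw [if_pos hP]
      have hck : d.contains k = true := hc k (by simp)
      have hkeys : (d.insert k 3).keys = d.keys := PySem.Dict.keys_insert_of_contains d (3:Int) hck
      have hnd' : (d.insert k 3).keys.Nodup := by rw [hkeys]; exact hnd
      have hc' : ∀ k' ∈ ks, (d.insert k 3).contains k' = true := by
        intro k' hk'
        rw [PySem.Dict.contains_insert]
        simp [hc k' (List.mem_cons_of_mem _ hk')]
      rw [ih _ hnd' hc', PySem.Dict.items_insert_of_contains d (3:Int) hck, List.map_map]
      refine List.map_congr_left ?_
      intro p _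
      by_cases hpk : p.1 = k
      · simp only [Function.comp, hpk, beq_self_eq_true, if_pos]
        have : P (k, (3 : Int)).1 ∧ (k, (3 : Int)).1 ∈ ks ∨ ¬(P (k, 3).1 ∧ (k, 3).1 ∈ ks) :=
          em _
        rcases this with h | h
        · simp [h.1, h.2]
        · simp only [if_neg h]
          simp [hP]
      · simp only [Function.comp, beq_iff_eq, if_neg hpk]
        by_cases hm : P p.1 ∧ p.1 ∈ ks
        · simp [hm.1, hm.2, List.mem_cons]
        · have : ¬(P p.1 ∧ p.1 ∈ k :: ks) := by
            rintro ⟨h1, h2⟩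
            rcases List.mem_cons.mp h2 with h | h
            · exact hpk h
            · exact hm ⟨h1, h⟩
          rw [if_neg hm, if_neg this]
    · rw [if_neg hP, ih _ hnd (fun k' hk' => hc k' (List.mem_cons_of_mem _ hk'))]
      refine List.map_congr_left ?_
      intro p _
      by_cases hm : P p.1 ∧ p.1 ∈ ks
      · simp [hm.1, hm.2, List.mem_cons]
      · have : ¬(P p.1 ∧ p.1 ∈ k :: ks) := by
          rintro ⟨h1, h2⟩
          rcases List.mem_cons.mp h2 with h | h
          · exact hP (h ▸ h1)
          · exact hm ⟨h1, h⟩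
        rw [if_neg hm, if_neg this]

-- the mutation pass over the dict's own keys rewrites every matching value in place
theorem mut_items_keys (n : Int) (d : PySem.Dict (Int × Int) Int) (hnd : d.keys.Nodup) :
    (d.keys.foldl
        (fun d i => if i.1 = 0 ∨ i.2 = 0 ∨ i.1 = n + 1 ∨ i.2 = n + 1 then d.insert i 3 else d)
        d).items
      = d.items.map
          (fun p => if p.1.1 = 0 ∨ p.1.2 = 0 ∨ p.1.1 = n + 1 ∨ p.1.2 = n + 1
            then (p.1, (3 : Int)) else p) := by
  rw [mut_items (fun i : Int × Int => i.1 = 0 ∨ i.2 = 0 ∨ i.1 = n + 1 ∨ i.2 = n + 1) d.keys d hnd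
    (fun k hk => by rw [PySem.Dict.contains_iff_mem_keys]; exact hk)]
  refine List.map_congr_left ?_
  intro p hp
  have hpk : p.1 ∈ d.keys := PySem.Dict.mem_keys_of_mem_items d hp
  by_cases hP : p.1.1 = 0 ∨ p.1.2 = 0 ∨ p.1.1 = n + 1 ∨ p.1.2 = n + 1
  · rw [if_pos ⟨hP, hpk⟩, if_pos hP]
  · rw [if_neg (fun h => hP h.1), if_neg hP]

-- [0]*(n+2)*(n+2) flattens to one long replicate
theorem rep_flat (a b : Nat) (x : Int) :
    (List.replicate a (List.replicate b x)).flatten = List.replicate (a * b) x := by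
  induction a with
  | zero => simp
  | succ a ih =>
    rw [List.replicate_succ, List.flatten_cons, ih, ← List.replicate_add, Nat.succ_mul,
      Nat.add_comm]

-- ===== VERDICT (by name: the statement is the Claim_ definition above) =====
theorem luo_ruudukko_spec : Claim_equal_luo_ruudukko := by
  intro n _
  unfold Spec_luo_ruudukko luo_ruudukko luo_ruudukko_alt
  have hlen : (PySem.List.pyRange 0 (n + 2) 1).length = (n + 2).toNat := by
    rw [PySem.List.length_pyRange_one]; norm_num
  -- the three parallel lists
  have hriv : PySem.List.pyRepeat (PySem.List.pyRange 0 (n + 2) 1) (n + 2)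
      = (List.replicate (PySem.List.pyRange 0 (n + 2) 1).length
          (PySem.List.pyRange 0 (n + 2) 1)).flatten := by
    rw [hlen]; rfl
  have hsar : luoSarakkeet n 0
      = (PySem.List.pyRange 0 (n + 2) 1).flatMap
          (fun c => (PySem.List.pyRange 0 (n + 2) 1).map (fun _ => c)) := by
    have := luoSarakkeet_eq n ((n + 2 - 0).toNat) 0 rfl
    simpa using this
  have harv : PySem.List.pyRepeat (PySem.List.pyRepeat [(0 : Int)] (n + 2)) (n + 2)
      = List.replicate ((PySem.List.pyRange 0 (n + 2) 1).length
          * (PySem.List.pyRange 0 (n + 2) 1).length) (0 : Int) := by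
    rw [PySem.List.pyRepeat_singleton, hlen]
    exact rep_flat _ _ _
  rw [hriv, hsar, harv]
  dsimp only
  rw [zip_flat]
  -- the dict build: all keys fresh and distinct, so the items list is just the zipped list
  have hmapk : ((PySem.List.pyRange 0 (n + 2) 1).flatMap
        (fun c => (PySem.List.pyRange 0 (n + 2) 1).map
          (fun y => (y, (c, (0 : Int)))))).map
        (fun a : Int × Int × Int => ((a.1, a.2.1) : Int × Int))
      = (PySem.List.pyRange 0 (n + 2) 1).flatMap
          (fun c => (PySem.List.pyRange 0 (n + 2) 1).map
            (fun y => ((y, c) : Int × Int))) := by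
    simp [List.map_flatMap, List.map_map, Function.comp_def]
  have hitems : (((PySem.List.pyRange 0 (n + 2) 1).flatMap
        (fun c => (PySem.List.pyRange 0 (n + 2) 1).map
          (fun y => (y, (c, (0 : Int)))))).foldl
        (fun d t => d.insert (t.1, t.2.1) t.2.2) PySem.Dict.empty).items
      = (PySem.List.pyRange 0 (n + 2) 1).flatMap
          (fun c => (PySem.List.pyRange 0 (n + 2) 1).map
            (fun y => (((y, c) : Int × Int), (0 : Int)))) := by
    rw [PySem.Dict.items_foldl_insert_fresh _
      (fun a : Int × Int × Int => ((a.1, a.2.1) : Int × Int))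
      (fun a : Int × Int × Int => a.2.2)
      PySem.Dict.empty (by intro a _; simp) (by rw [hmapk]; exact keys_nodup (n + 2))]
    simp [List.map_flatMap, List.map_map, Function.comp_def]
    rfl
  have hkeys : ((((PySem.List.pyRange 0 (n + 2) 1).flatMap
        (fun c => (PySem.List.pyRange 0 (n + 2) 1).map
          (fun y => (y, (c, (0 : Int)))))).foldl
        (fun d t => d.insert (t.1, t.2.1) t.2.2) PySem.Dict.empty).keys)
      = (PySem.List.pyRange 0 (n + 2) 1).flatMap
          (fun c => (PySem.List.pyRange 0 (n + 2) 1).map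
            (fun y => ((y, c) : Int × Int))) := by
    simp only [PySem.Dict.keys, hitems]
    simp [List.map_flatMap, List.map_map, Function.comp_def]
  rw [mut_items_keys n _ (by rw [hkeys]; exact keys_nodup (n + 2)), hitems, List.map_map]
  simp only [List.map_flatMap, List.map_map, Function.comp_def, apply_ite]
  simp only [ite_self]
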